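-- pv_equiv track=rewrite | github.com/DarkArex/Labaratornaya | program/6.4.py | PoiskID
-- ===== SOURCE A (Python) =====
-- def PoiskID(enter, id):
--     x = None
--     y = None
--     for i, entry in enumerate(enter):
--         if entry == id:
--             if x is None:
--                 x = i
--             else:
--                 y = i
--     if x is None:
--         return ()
--     elif y is None:
--         return enter[x:]
--     else:
--         return enter[x:y+1]
-- ===== SOURCE B (Python) =====
-- def PoiskID(enter, id):
--     if id not in enter:
--         return ()
--     first = enter.index(id)
--     last = len(enter) - 1 - enter[::-1].index(id)
--     if last == first:
--         return enter[first:]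
--     return enter[first:last + 1]
-- ===== Notes on version B (the rewrite author's own statement) =====
-- stated objective: idiomatic
-- what changed: Replaces the single enumerate loop maintaining two optional accumulators by a membership test plus two library index lookups (forward .index and .index on the reversed list), branching on first==last to reproduce the single-occurrence tail slice.
import Mathlib
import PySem

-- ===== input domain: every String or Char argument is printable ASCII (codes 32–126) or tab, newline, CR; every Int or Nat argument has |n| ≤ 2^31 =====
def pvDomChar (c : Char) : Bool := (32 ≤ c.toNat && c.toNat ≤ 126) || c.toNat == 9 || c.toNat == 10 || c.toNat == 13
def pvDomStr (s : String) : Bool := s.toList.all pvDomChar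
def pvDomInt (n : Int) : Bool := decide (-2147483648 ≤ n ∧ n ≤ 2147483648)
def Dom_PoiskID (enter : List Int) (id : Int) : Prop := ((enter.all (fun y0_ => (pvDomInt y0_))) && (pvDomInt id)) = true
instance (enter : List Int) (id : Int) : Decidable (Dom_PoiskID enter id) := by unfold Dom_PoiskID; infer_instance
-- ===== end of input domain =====

-- B replaces A's single two-accumulator loop by a membership test plus two library
-- index lookups (forward and on the reversed list); return values are identical (idiomatic objective).

-- ===== PORT A =====
-- one loop step of A: update (x, y) at index/value pair ie
def pvStepA (id : Int) (p : Option Int × Option Int) (ie : Int × Int) : Option Int × Option Int :=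
  if ie.2 == id then
    match p.1 with
    | none => (some ie.1, p.2)
    | some _ => (p.1, some ie.1)
  else p

def PoiskID (enter : List Int) (id : Int) : List Int :=
  match (PySem.List.enumerate enter 0).foldl (pvStepA id) (none, none) with
  | (none, _) => []                                                   -- return ()
  | (some x, none) => PySem.List.slice enter (some x) none            -- return enter[x:]
  | (some x, some y) => PySem.List.slice enter (some x) (some (y+1))  -- return enter[x:y+1]

-- ===== PORT B =====
-- enter[::-1] is enter.reverse (PySem.List.slice?_none_none_neg_one); both .index calls
-- succeed because they run under the membership guard, so the catch-all arm is unreachable.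
def PoiskID_alt (enter : List Int) (id : Int) : List Int :=
  if id ∈ enter then
    match PySem.List.index? enter id, PySem.List.index? enter.reverse id with
    | some f, some r =>
      let last : Int := (enter.length : Int) - 1 - (r : Int)
      if last = (f : Int) then PySem.List.slice enter (some (f : Int)) none
      else PySem.List.slice enter (some (f : Int)) (some (last + 1))
    | _, _ => []
  else []

-- ===== PRECONDITION & SPEC =====
def Spec_PoiskID (enter : List Int) (id : Int) (out : List Int) : Prop := out = PoiskID_alt enter id
instance (enter : List Int) (id : Int) (out : List Int) : Decidable (Spec_PoiskID enter id out) := by unfold Spec_PoiskID; infer_instance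

-- ===== CLAIM (what is proved, stated in full; the proofs are below) =====
def Claim_equal_PoiskID : Prop := ∀ (enter : List Int) (id : Int), Dom_PoiskID enter id → Spec_PoiskID enter id (PoiskID enter id)

-- ===== LEMMAS AND PROOFS =====

-- index of the LAST occurrence of id in xs (proof-only characterisation of A's y)
def pvLastIdx? (xs : List Int) (id : Int) : Option Nat :=
  match xs with
  | [] => none
  | a :: t =>
    match pvLastIdx? t id with
    | some k => some (k + 1)
    | none => if a = id then some 0 else none

theorem pvLastIdx?_eq_none_iff (xs : List Int) (id : Int) :
    pvLastIdx? xs id = none ↔ id ∉ xs := by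
  induction xs with
  | nil => simp [pvLastIdx?]
  | cons a t ih =>
    simp only [pvLastIdx?]
    cases h : pvLastIdx? t id with
    | some k =>
      have hmem : id ∈ t := by
        by_contra hc; rw [ih.mpr hc] at h; simp at h
      simp [List.mem_cons, hmem]
    | none =>
      by_cases ha : a = id
      · simp [ha, List.mem_cons]
      · simp [ha, List.mem_cons, ih.mp h, Ne.symm ha]

-- A's loop after the first occurrence was recorded: x stays, y tracks the last occurrence
theorem pvFoldA_some (id : Int) (xs : List Int) :
    ∀ (s v : Int) (y0 : Option Int),
    (PySem.List.enumerate xs s).foldl (pvStepA id) (some v, y0) =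
      (some v, match pvLastIdx? xs id with
               | some l => some (s + l)
               | none => y0) := by
  induction xs with
  | nil => intro s v y0; simp [PySem.List.enumerate_nil, pvLastIdx?]
  | cons b t ih =>
    intro s v y0
    rw [PySem.List.enumerate_cons, List.foldl_cons]
    by_cases hb : b = id
    · simp only [pvStepA, hb, beq_self_eq_true, if_true]
      rw [ih]
      simp only [pvLastIdx?]
      cases h : pvLastIdx? t id with
      | some k => simp [h]; push_cast; ring
      | none => simp [h, hb]
    · have : pvStepA id (some v, y0) (s, b) = (some v, y0) := by
        simp [pvStepA, hb]
      rw [this, ih]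
      simp only [pvLastIdx?]
      cases h : pvLastIdx? t id with
      | some k => simp [h]; push_cast; ring
      | none => simp [h, hb]

-- A's whole loop from the initial state (none, none)
theorem pvFoldA_main (id : Int) (xs : List Int) :
    ∀ (s : Int),
    (PySem.List.enumerate xs s).foldl (pvStepA id) (none, none) =
      (match PySem.List.index? xs id with
       | none => (none, none)
       | some f =>
         (some (s + f),
          match pvLastIdx? xs id with
          | some l => if l = f then none else some (s + l)
          | none => none)) := by
  induction xs with
  | nil => intro s; simp [PySem.List.enumerate_nil, PySem.List.index?]
  | cons a t ih =>
    intro s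
    rw [PySem.List.enumerate_cons, List.foldl_cons]
    by_cases ha : a = id
    · have hstep : pvStepA id (none, none) (s, a) = (some s, none) := by
        simp [pvStepA, ha]
      rw [hstep, pvFoldA_some]
      subst ha
      rw [PySem.List.index?_cons_self]
      simp only [pvLastIdx?]
      cases h : pvLastIdx? t a with
      | some k => simp; push_cast; ring
      | none => simp
    · have hstep : pvStepA id (none, none) (s, a) = (none, none) := by
        simp [pvStepA, ha]
      rw [hstep, ih]
      rw [PySem.List.index?_cons_of_ne t ha]
      cases hf : PySem.List.index? t id with
      | none => simp
      | some f =>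
        simp only [hf, Option.map_some]
        have hl : pvLastIdx? (a :: t) id =
            (pvLastIdx? t id).map (· + 1) := by
          simp only [pvLastIdx?]
          cases h : pvLastIdx? t id with
          | some k => simp
          | none => simp [ha]
        rw [hl]
        cases h : pvLastIdx? t id with
        | none => simp; push_cast; ring
        | some l =>
          simp only [Option.map_some]
          by_cases hlf : l = f
          · simp [hlf]; push_cast; ring
          · have : ¬ (l + 1 = f + 1) := by omega
            simp [hlf, this]; constructor <;> (push_cast; ring)

-- last occurrence via the reversed list's first occurrence (B's computation)
theorem pvLastIdx?_eq_reverse_index? (id : Int) (xs : List Int) :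
    pvLastIdx? xs id = (PySem.List.index? xs.reverse id).map (fun r => xs.length - 1 - r) := by
  induction xs with
  | nil => simp [pvLastIdx?, PySem.List.index?]
  | cons a t ih =>
    by_cases hm : id ∈ t
    · obtain ⟨r, hr⟩ := Option.isSome_iff_exists.mp
        ((PySem.List.index?_isSome_iff (xs := t.reverse) (v := id)).mpr (by simpa using hm))
      obtain ⟨hrlt, -, -⟩ := PySem.List.getElem_of_index?_eq_some hr
      rw [List.length_reverse] at hrlt
      have hrev : PySem.List.index? (a :: t).reverse id = some r := by
        rw [List.reverse_cons, PySem.List.index?_append_of_mem _ (by simpa using hm), hr]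
      rw [hrev]
      simp only [pvLastIdx?, ih, hr, Option.map_some, List.length_cons]
      congr 1
      omega
    · have hrevt : PySem.List.index? t.reverse id = none := by
        rw [PySem.List.index?_eq_none_iff]; simpa using hm
      have ht : pvLastIdx? t id = none := (pvLastIdx?_eq_none_iff t id).mpr hm
      by_cases ha : a = id
      · subst ha
        have : PySem.List.index? (a :: t).reverse a = some t.reverse.length := by
          rw [List.reverse_cons]
          exact PySem.List.index?_append_singleton_self t.reverse a (by simpa using hm)
        rw [this]
        simp [pvLastIdx?, ht, List.length_reverse]
      · have : PySem.List.index? (a :: t).reverse id = none := by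
          rw [PySem.List.index?_eq_none_iff, List.reverse_cons]
          simp [hm]
          exact fun h => ha h.symm
        rw [this]
        simp [pvLastIdx?, ht, ha]

-- ===== VERDICT (by name: the statement is the Claim_ definition above) =====
theorem PoiskID_spec : Claim_equal_PoiskID := by
  intro enter id _
  unfold Spec_PoiskID PoiskID PoiskID_alt
  rw [pvFoldA_main]
  cases hf : PySem.List.index? enter id with
  | none =>
    have hm : id ∉ enter := (PySem.List.index?_eq_none_iff _ _).mp hf
    simp [hm]
  | some f =>
    have hm : id ∈ enter := (PySem.List.index?_isSome_iff (xs := enter) (v := id)).mp (by rw [hf]; rfl)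
    obtain ⟨r, hr⟩ := Option.isSome_iff_exists.mp
      ((PySem.List.index?_isSome_iff (xs := enter.reverse) (v := id)).mpr (by simpa using hm))
    obtain ⟨hrlt, -, -⟩ := PySem.List.getElem_of_index?_eq_some hr
    rw [List.length_reverse] at hrlt
    have hl : pvLastIdx? enter id = some (enter.length - 1 - r) := by
      rw [pvLastIdx?_eq_reverse_index? id enter, hr]; rfl
    rw [hl]
    simp only [hm, if_true, hr]
    have hcast : (enter.length : Int) - 1 - (r : Int) = ((enter.length - 1 - r : Nat) : Int) := by
      push_cast [Nat.sub_sub]; omega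
    by_cases hlf : enter.length - 1 - r = f
    · have : ((enter.length : Int) - 1 - (r : Int)) = (f : Int) := by rw [hcast, hlf]
      simp [hlf, this]
    · have : ¬ ((enter.length : Int) - 1 - (r : Int)) = (f : Int) := by
        rw [hcast]; exact_mod_cast hlf
      simp [hlf, this, hcast]
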